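-- pv_equiv track=rewrite | github.com/Zenobia000/gallup-strengths-assessment | src/main/python/core/thurstonian/block_generator.py | generate_systematic_blocks
-- ===== SOURCE A (Python) =====
-- from typing import List, Dict, Any, Optional, Tuple
--
-- def generate_systematic_blocks(target_blocks: int = 30) -> List[List[str]]:
--     """使用系統化輪轉規則生成區塊"""
--     talents = [f"T{i}" for i in range(1, 13)]  # T1 to T12
--     blocks = []
--
--     # Systematic rotation pattern: (block_index + offset) mod 12
--     offsets = [0, 3, 6, 9]  # Ensure good distribution across domains
--
--     for block_idx in range(target_blocks):
--         block_talents = []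
--         for offset in offsets:
--             talent_idx = (block_idx + offset) % 12
--             talent_id = talents[talent_idx]
--             block_talents.append(talent_id)
--
--         blocks.append(block_talents)
--
--     return blocks
-- ===== SOURCE B (Python) =====
-- from typing import List
--
--
-- def generate_systematic_blocks(target_blocks: int = 30) -> List[List[str]]:
--     """Rotate the talent list by block index and take every third element."""
--     talents = [f"T{i}" for i in range(1, 13)]
--     blocks = []
--     for block_idx in range(target_blocks):
--         r = block_idx % 12
--         rotated = talents[r:] + talents[:r]
--         blocks.append(rotated[0::3])
--     return blocks
-- ===== Notes on version B (the rewrite author's own statement) =====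
-- stated objective: idiomatic
-- what changed: Replaces the inner per-offset modular-index loop with a list rotation (talents[r:] + talents[:r]) followed by a strided slice [0::3] per block.
import Mathlib
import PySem

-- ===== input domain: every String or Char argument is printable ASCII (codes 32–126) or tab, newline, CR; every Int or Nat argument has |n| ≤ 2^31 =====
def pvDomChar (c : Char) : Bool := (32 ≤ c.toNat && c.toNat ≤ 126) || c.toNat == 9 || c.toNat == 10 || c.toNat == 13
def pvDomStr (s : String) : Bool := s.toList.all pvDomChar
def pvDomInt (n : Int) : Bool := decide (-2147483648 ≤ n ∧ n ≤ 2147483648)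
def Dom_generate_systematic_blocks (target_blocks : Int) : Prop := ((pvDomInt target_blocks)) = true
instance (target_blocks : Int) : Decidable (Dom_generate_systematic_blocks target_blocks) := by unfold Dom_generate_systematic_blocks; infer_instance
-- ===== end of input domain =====

-- B replaces A's inner per-offset modular-index loop with a list rotation plus a strided
-- slice per block (idiomatic; same cost). Return values proved equal for every target_blocks.

-- ===== PORT A =====
-- literal port of A: inner loop over offsets, talent_idx = (block_idx + offset) % 12;
-- talents[talent_idx] is always in range (index in [0,12)), so pyGet? is always some and .getD "" never fires
def generate_systematic_blocks (target_blocks : Int) : List (List String) :=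
  let talents : List String := (PySem.List.pyRange 1 13 1).map (fun i => "T" ++ PySem.Int.toStr i)
  let offsets : List Int := [0, 3, 6, 9]
  (PySem.List.pyRange 0 target_blocks 1).foldl
    (fun blocks block_idx =>
      let block_talents := offsets.foldl
        (fun bt offset =>
          let talent_idx := PySem.Int.mod (block_idx + offset) 12
          let talent_id := (PySem.List.pyGet? talents talent_idx).getD ""
          bt ++ [talent_id]) []
      blocks ++ [block_talents]) []

-- ===== PORT B =====
-- literal port of Source B: rotated = talents[r:] + talents[:r]; block = rotated[0::3]
-- (slice? is some whenever step ≠ 0, so .getD [] never fires)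
def generate_systematic_blocks_alt (target_blocks : Int) : List (List String) :=
  let talents : List String := (PySem.List.pyRange 1 13 1).map (fun i => "T" ++ PySem.Int.toStr i)
  (PySem.List.pyRange 0 target_blocks 1).foldl
    (fun blocks block_idx =>
      let r := PySem.Int.mod block_idx 12
      let rotated := PySem.List.slice talents (some r) none ++ PySem.List.slice talents none (some r)
      blocks ++ [(PySem.List.slice? rotated (some 0) none 3).getD []]) []

-- ===== PRECONDITION & SPEC =====
def Spec_generate_systematic_blocks (target_blocks : Int) (out : List (List String)) : Prop := out = generate_systematic_blocks_alt target_blocks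
instance (target_blocks : Int) (out : List (List String)) : Decidable (Spec_generate_systematic_blocks target_blocks out) := by unfold Spec_generate_systematic_blocks; infer_instance

-- ===== CLAIM (what is proved, stated in full; the proofs are below) =====
def Claim_equal_generate_systematic_blocks : Prop := ∀ (target_blocks : Int), Dom_generate_systematic_blocks target_blocks → Spec_generate_systematic_blocks target_blocks (generate_systematic_blocks target_blocks)

-- ===== LEMMAS AND PROOFS =====

-- the per-block bodies agree for every block index x ≥ 0: case on x % 12
theorem pv_block_eq (x : Int) (_hx : 0 ≤ x) :
    [(0:Int), 3, 6, 9].foldl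
      (fun bt offset =>
        bt ++ [(PySem.List.pyGet?
          ((PySem.List.pyRange 1 13 1).map (fun i => "T" ++ PySem.Int.toStr i))
          (PySem.Int.mod (x + offset) 12)).getD ""]) []
    = (PySem.List.slice?
        (PySem.List.slice ((PySem.List.pyRange 1 13 1).map (fun i => "T" ++ PySem.Int.toStr i))
            (some (PySem.Int.mod x 12)) none
         ++ PySem.List.slice ((PySem.List.pyRange 1 13 1).map (fun i => "T" ++ PySem.Int.toStr i))
            none (some (PySem.Int.mod x 12)))
        (some 0) none 3).getD [] := by
  have h12 : (0:Int) < 12 := by norm_num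
  simp only [List.foldl, PySem.Int.mod_eq_emod_of_pos h12]
  have h0 : (x + 0) % 12 = x % 12 := by omega
  have h3 : (x + 3) % 12 = (x % 12 + 3) % 12 := by omega
  have h6 : (x + 6) % 12 = (x % 12 + 6) % 12 := by omega
  have h9 : (x + 9) % 12 = (x % 12 + 9) % 12 := by omega
  rw [h0, h3, h6, h9]
  have hlo : 0 ≤ x % 12 := Int.emod_nonneg x (by norm_num)
  have hhi : x % 12 < 12 := Int.emod_lt_of_pos x h12
  interval_cases h : x % 12 <;> rfl

theorem generate_systematic_blocks_spec_aux (t : Int) :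
    generate_systematic_blocks t = generate_systematic_blocks_alt t := by
  unfold generate_systematic_blocks generate_systematic_blocks_alt
  apply PySem.List.foldl_congr_mem
  intro acc x hx
  have hx0 : 0 ≤ x := (PySem.List.mem_pyRange_one.mp hx).1
  simp only []
  rw [pv_block_eq x hx0]

-- ===== VERDICT (by name: the statement is the Claim_ definition above) =====
theorem generate_systematic_blocks_spec : Claim_equal_generate_systematic_blocks := by
  intro t _
  exact generate_systematic_blocks_spec_aux t
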